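-- pv_equiv track=rewrite | github.com/djairb/Criptografia-RSA | algoritmo2 - Encriptar Mensagem.py | gerarPeQ
-- ===== SOURCE A (Python) =====
-- def Eprimo(number):
--   if number > 1:
--     for i in range(2, number):
--         if number % i == 0:
--             return False
--     else:
--         return True
--
-- def gerarPeQ(numero):
--   algorNum = numero
--   listaPeQ = []
--   for i in range(1000):
--     if len(str(i)) == algorNum:
--       if Eprimo(i):
--         listaPeQ.append(i)
--         if len(listaPeQ) == 2:
--           break
--   return listaPeQ
-- ===== SOURCE B (Python) =====
-- from math import isqrt
--
--
-- def Eprimo(number):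
--     if number > 1:
--         for i in range(2, isqrt(number) + 1):
--             if number % i == 0:
--                 return False
--         return True
--
--
-- def gerarPeQ(numero):
--     if numero < 1 or numero > 3:
--         return []
--     start = 0 if numero == 1 else 10 ** (numero - 1)
--     stop = min(10 ** numero, 1000)
--     listaPeQ = []
--     n = start
--     while n < stop and len(listaPeQ) < 2:
--         if Eprimo(n):
--             listaPeQ.append(n)
--         n += 1
--     return listaPeQ
-- ===== Notes on version B (the rewrite author's own statement) =====
-- stated objective: faster
-- what changed: B computes the digit-bounded range [start, min(10**numero,1000)) directly instead of scanning all of range(1000) and filtering by len(str(i)), and tests primality by trial division only up to isqrt(n) instead of up to n-1.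
import Mathlib
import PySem

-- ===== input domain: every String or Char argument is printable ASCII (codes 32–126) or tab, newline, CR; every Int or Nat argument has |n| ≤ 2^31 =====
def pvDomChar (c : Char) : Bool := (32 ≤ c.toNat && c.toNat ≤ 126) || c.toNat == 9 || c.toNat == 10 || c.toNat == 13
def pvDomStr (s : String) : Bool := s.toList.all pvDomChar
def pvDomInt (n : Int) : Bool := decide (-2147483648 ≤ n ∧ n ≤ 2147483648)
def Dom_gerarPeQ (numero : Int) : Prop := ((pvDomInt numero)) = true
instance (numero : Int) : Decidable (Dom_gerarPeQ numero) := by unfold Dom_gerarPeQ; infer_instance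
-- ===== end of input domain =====

set_option maxRecDepth 100000


-- B iterates directly over the digit-bounded range and tests primality only up to the square root,
-- instead of A's scan of all of range(1000) filtered by len(str(i)) with trial division up to i-1.

-- ===== PORT A =====
-- Eprimo's for-loop: first divisor found returns False, a completed loop returns True.
def EprimoLoop (number : Int) : List Int → Bool
  | [] => true
  | i :: r => if PySem.Int.mod number i = 0 then false else EprimoLoop number r

-- returns none exactly where Python's Eprimo falls through (number <= 1: returns None)
def Eprimo (number : Int) : Option Bool :=
  if number > 1 then some (EprimoLoop number (PySem.List.pyRange 2 number 1)) else none

-- the for-loop of gerarPeQ with its break once two primes are collected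
def gerarLoopA (numero : Int) : List Int → List Int → List Int
  | [], acc => acc
  | i :: r, acc =>
    if (PySem.Str.len (PySem.Int.toStr i)) = numero then
      if Eprimo i = some true then
        if ((acc ++ [i]).length : Int) = 2 then acc ++ [i]
        else gerarLoopA numero r (acc ++ [i])
      else gerarLoopA numero r acc
    else gerarLoopA numero r acc

def gerarPeQ (numero : Int) : List Int :=
  gerarLoopA numero (PySem.List.pyRange 0 1000 1) []

-- ===== PORT B =====
-- trial division loop of Source B ('for i in range(2, isqrt(n)+1)'), run with fuel m+1-i:
-- the fuel is exhausted only when i > m, where i*i > m (i ≥ 2 always) and the loop has ended anyway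
def bTrialF (m : Nat) : Nat → Nat → Bool
  | 0, _ => true
  | f + 1, i => if i * i ≤ m then (if m % i = 0 then false else bTrialF m f (i + 1)) else true

def bTrial (m i : Nat) : Bool := bTrialF m (m + 1 - i) i

-- Source B's Eprimo (sqrt-bounded); only ever called on 0 ≤ n in gerarPeQ_alt
def EprimoB (n : Int) : Bool :=
  if n > 1 then bTrial n.toNat 2 else false

-- the while-loop of Source B, run with fuel (stop-n).toNat (n increments once per iteration;
-- exhausted fuel means n ≥ stop, where the loop has ended anyway)
def bScanF : Nat → Int → Int → List Int → List Int
  | 0, _, _, acc => acc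
  | f + 1, stop, n, acc =>
    if n < stop ∧ acc.length < 2 then
      bScanF f stop (n + 1) (if EprimoB n then acc ++ [n] else acc)
    else acc

def bScan (stop n : Int) (acc : List Int) : List Int := bScanF (stop - n).toNat stop n acc

def gerarPeQ_alt (numero : Int) : List Int :=
  if numero < 1 ∨ numero > 3 then []
  else
    let start : Int := if numero = 1 then 0 else 10 ^ (numero - 1).toNat
    let stop : Int := min (10 ^ numero.toNat) 1000
    bScan stop start []

-- ===== PRECONDITION & SPEC =====
def Spec_gerarPeQ (numero : Int) (out : List Int) : Prop := out = gerarPeQ_alt numero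
instance (numero : Int) (out : List Int) : Decidable (Spec_gerarPeQ numero out) := by unfold Spec_gerarPeQ; infer_instance

-- ===== CLAIM (what is proved, stated in full; the proofs are below) =====
def Claim_equal_gerarPeQ : Prop := ∀ (numero : Int), Dom_gerarPeQ numero → Spec_gerarPeQ numero (gerarPeQ numero)

-- ===== LEMMAS AND PROOFS =====

-- A's loop returns its accumulator unchanged when no element has the requested digit count
theorem gerarLoopA_skip (numero : Int) (l : List Int) (acc : List Int)
    (h : ∀ i ∈ l, PySem.Str.len (PySem.Int.toStr i) ≠ numero) :
    gerarLoopA numero l acc = acc := by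
  induction l with
  | nil => rfl
  | cons x r ih =>
    have hx := h x (List.mem_cons_self)
    simp only [gerarLoopA, if_neg hx]
    exact ih (fun i hi => h i (List.mem_cons_of_mem _ hi))

-- every i in range(1000) prints with 1 to 3 digits
theorem digits_small :
    (PySem.List.pyRange 0 1000 1).all
      (fun i => decide (1 ≤ PySem.Str.len (PySem.Int.toStr i) ∧ PySem.Str.len (PySem.Int.toStr i) ≤ 3)) = true := by
  decide

-- ===== VERDICT (by name: the statement is the Claim_ definition above) =====
theorem gerarPeQ_spec : Claim_equal_gerarPeQ := by
  unfold Claim_equal_gerarPeQ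
  intro numero _
  unfold Spec_gerarPeQ
  by_cases h1 : numero = 1
  · subst h1; decide
  · by_cases h2 : numero = 2
    · subst h2; decide
    · by_cases h3 : numero = 3
      · subst h3; decide
      · have hout : numero < 1 ∨ numero > 3 := by omega
        have hB : gerarPeQ_alt numero = [] := by
          unfold gerarPeQ_alt
          simp [if_pos hout]
        have hA : gerarPeQ numero = [] := by
          unfold gerarPeQ
          apply gerarLoopA_skip
          intro i hi
          have := List.all_eq_true.mp digits_small i hi
          have hlen := of_decide_eq_true this
          omega
        rw [hA, hB]
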